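-- pv_equiv track=rewrite | github.com/rmarco30/python | subnet_calculator_v1/subnet.py | subnet
-- ===== SOURCE A (Python) =====
-- import math
--
-- def bits(host, opt = 'int'):
--
-- 	for bits in range(32):
--
-- 		if host <= 2**(bits):
-- 			break
--
-- 	if opt == 'str':
-- 		return str(bits) + ' bits'
--
-- 	else:
-- 		return bits
--
-- def cidr(host, opt = 'int'):
--
-- 	if opt == 'str':
-- 		return '/' + str(32 - bits(host))
--
-- 	else:
-- 		return 32 - bits(host)
--
-- def subnet(host, inwhat):
--
-- 	snm_dec = ['','','','',]
-- 	snm_bin = ['','','','',]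
-- 	snm = ''
-- 	x = 0
--
-- 	for i in range(32):
--
-- 		if i < math.floor(cidr(host)):
-- 			snm += '1'
--
-- 		elif i >= math.floor(cidr(host)):
-- 			snm += '0'
--
-- 		if (i+1) % 8 == 0:
-- 			snm += '.'
-- 			snm_bin[x] = snm[:-1]
-- 			snm_dec[x] = int(snm_bin[x], 2)
-- 			snm = ''
-- 			x += 1
--
-- 	if inwhat == 'dec':
-- 		return '.'.join(map(str, snm_dec)) + '\n'
-- 	if inwhat == 'bin':
-- 		return '.'.join(map(str, snm_bin)) + '\n'
-- ===== SOURCE B (Python) =====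
-- def bits(host, opt = 'int'):
--
-- 	for bits in range(32):
--
-- 		if host <= 2**(bits):
-- 			break
--
-- 	if opt == 'str':
-- 		return str(bits) + ' bits'
--
-- 	else:
-- 		return bits
--
-- def cidr(host, opt = 'int'):
--
-- 	if opt == 'str':
-- 		return '/' + str(32 - bits(host))
--
-- 	else:
-- 		return 32 - bits(host)
--
-- def subnet(host, inwhat):
-- 	n = cidr(host)
-- 	full = '1' * n + '0' * (32 - n)
-- 	octets = [full[8 * k: 8 * k + 8] for k in range(4)]
-- 	if inwhat == 'dec':
-- 		return '.'.join(str(int(o, 2)) for o in octets) + '\n'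
-- 	if inwhat == 'bin':
-- 		return '.'.join(octets) + '\n'
-- ===== Notes on version B (the rewrite author's own statement) =====
-- stated objective: simpler
-- what changed: B computes the prefix length once, builds the whole 32-char mask string as '1'*n+'0'*(32-n), slices it into four octets and formats them, replacing A's 32-iteration loop that recomputes cidr(host) per bit and maintains running string/list/index state.
import Mathlib
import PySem

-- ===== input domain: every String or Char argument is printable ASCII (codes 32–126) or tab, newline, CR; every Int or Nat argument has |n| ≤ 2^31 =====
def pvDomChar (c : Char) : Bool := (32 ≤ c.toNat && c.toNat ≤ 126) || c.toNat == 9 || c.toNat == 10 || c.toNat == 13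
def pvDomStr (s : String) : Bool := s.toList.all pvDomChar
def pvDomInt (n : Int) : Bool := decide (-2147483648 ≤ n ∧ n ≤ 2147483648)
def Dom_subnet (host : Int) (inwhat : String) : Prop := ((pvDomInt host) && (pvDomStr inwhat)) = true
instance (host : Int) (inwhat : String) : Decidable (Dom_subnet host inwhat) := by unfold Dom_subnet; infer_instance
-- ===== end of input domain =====

-- B builds the 32-bit mask string once from the CIDR prefix length and slices it into four
-- octets, instead of A's per-bit loop with running state (objective: simpler). Both ports work
-- on List Char (the PySem string representation) and wrap with String.ofList at the end.

-- ===== PORT A =====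
-- `for bits in range(32): if host <= 2**bits: break` — the loop variable keeps its last value
-- when the loop falls through; range(32) is nonempty so the initial accumulator 0 is never used.
def bitsLoopA (host : Int) : List Int → Int → Int
  | [], cur => cur
  | b :: rest, _ => if host ≤ 2 ^ b.toNat then b else bitsLoopA host rest b

def bitsA (host : Int) : Int := bitsLoopA host (PySem.List.pyRange 0 32 1) 0

def cidrA (host : Int) : Int := 32 - bitsA host

-- Python inits snm_dec entries to '' (strings); all four entries are overwritten before use,
-- so an Int init list is equivalent. int(s, 2) is PySem.Int.ofCharsBase? (never none here:
-- the argument is always 8 chars of '0'/'1'). math.floor of an int is the int itself.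
def subnet (host : Int) (inwhat : String) : Option String :=
  let init : List Char × List (List Char) × List Int × Int :=
    ([], [[], [], [], []], [0, 0, 0, 0], 0)
  let r := (PySem.List.pyRange 0 32 1).foldl (fun st i =>
    let snm := if i < cidrA host then st.1 ++ ['1']
               else if cidrA host ≤ i then st.1 ++ ['0'] else st.1
    if PySem.Int.mod (i + 1) 8 = 0 then
      let snm := snm ++ ['.']
      let b := PySem.List.slice snm none (some (-1))
      let sbin := PySem.List.pySetD st.2.1 st.2.2.2 b
      let sdec := PySem.List.pySetD st.2.2.1 st.2.2.2 ((PySem.Int.ofCharsBase? b 2).getD 0)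
      (([] : List Char), sbin, sdec, st.2.2.2 + 1)
    else (snm, st.2.1, st.2.2.1, st.2.2.2)) init
  if inwhat = "dec" then
    some (String.ofList (List.intercalate ['.'] (r.2.2.1.map PySem.Int.toChars) ++ ['\n']))
  else if inwhat = "bin" then
    some (String.ofList (List.intercalate ['.'] r.2.1 ++ ['\n']))
  else none

-- ===== PORT B =====
-- Source B keeps the bits/cidr helpers verbatim, so their ports are the same transliteration.
def bitsLoopB (host : Int) : List Int → Int → Int
  | [], cur => cur
  | b :: rest, _ => if host ≤ 2 ^ b.toNat then b else bitsLoopB host rest b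

def bitsB (host : Int) : Int := bitsLoopB host (PySem.List.pyRange 0 32 1) 0

def cidrB (host : Int) : Int := 32 - bitsB host

def subnet_alt (host : Int) (inwhat : String) : Option String :=
  let n := cidrB host
  let full := PySem.List.pyRepeat ['1'] n ++ PySem.List.pyRepeat ['0'] (32 - n)
  let octets := (PySem.List.pyRange 0 4 1).map (fun k =>
    PySem.List.slice full (some (8 * k)) (some (8 * k + 8)))
  if inwhat = "dec" then
    some (String.ofList (List.intercalate ['.']
      (octets.map (fun o => PySem.Int.toChars ((PySem.Int.ofCharsBase? o 2).getD 0))) ++ ['\n']))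
  else if inwhat = "bin" then
    some (String.ofList (List.intercalate ['.'] octets ++ ['\n']))
  else none

-- ===== PRECONDITION & SPEC =====
def Spec_subnet (host : Int) (inwhat : String) (out : Option String) : Prop := out = subnet_alt host inwhat
instance (host : Int) (inwhat : String) (out : Option String) : Decidable (Spec_subnet host inwhat out) := by unfold Spec_subnet; infer_instance

-- ===== CLAIM (what is proved, stated in full; the proofs are below) =====
def Claim_equal_subnet : Prop := ∀ (host : Int) (inwhat : String), Dom_subnet host inwhat → Spec_subnet host inwhat (subnet host inwhat)

-- ===== LEMMAS AND PROOFS =====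
theorem bitsLoopB_eq (host : Int) (l : List Int) (cur : Int) :
    bitsLoopB host l cur = bitsLoopA host l cur := by
  induction l generalizing cur with
  | nil => rfl
  | cons b t ih => simp only [bitsLoopA, bitsLoopB]; split_ifs <;> simp [ih]

theorem cidrB_eq (host : Int) : cidrB host = cidrA host := by
  simp [cidrA, cidrB, bitsA, bitsB, bitsLoopB_eq]

theorem bitsLoopA_bounds (host : Int) (l : List Int) (cur : Int)
    (hl : ∀ b ∈ l, 0 ≤ b ∧ b ≤ 31) (hc : 0 ≤ cur ∧ cur ≤ 31) :
    0 ≤ bitsLoopA host l cur ∧ bitsLoopA host l cur ≤ 31 := by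
  induction l generalizing cur with
  | nil => simpa [bitsLoopA] using hc
  | cons b t ih =>
    have hb := hl b (by simp)
    simp only [bitsLoopA]
    split_ifs
    · exact hb
    · exact ih b (fun x hx => hl x (by simp [hx])) hb

theorem cidrA_bounds (host : Int) : 1 ≤ cidrA host ∧ cidrA host ≤ 32 := by
  have h := bitsLoopA_bounds host (PySem.List.pyRange 0 32 1) 0
    (by intro b hb; have := (PySem.List.mem_pyRange_one).1 hb; omega) (by omega)
  unfold cidrA bitsA
  omega

-- ===== VERDICT (by name: the statement is the Claim_ definition above) =====
set_option maxHeartbeats 2000000 in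
theorem subnet_spec : Claim_equal_subnet := by
  intro host inwhat _
  unfold Spec_subnet
  have hb := cidrA_bounds host
  simp only [subnet, subnet_alt, cidrB_eq]
  generalize hc : cidrA host = c at hb ⊢
  obtain ⟨h1, h2⟩ := hb
  interval_cases c <;> (split_ifs <;> decide)
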